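-- pv_equiv track=rewrite | github.com/csh-lovenico/my-leetcode | 951_1000/985_sum_of_even_numbers_after_queries.py | sumEvenAfterQueries
-- ===== SOURCE A (Python) =====
-- from typing import List
--
-- def sumEvenAfterQueries(nums: List[int], queries: List[List[int]]) -> List[int]:
--     res = []
--     s = 0
--     for i in range(len(nums)):
--         if nums[i] % 2 == 0:
--             s += nums[i]
--     for add, idx in queries:
--         curr = nums[idx]
--         if curr % 2 == 0:
--             nums[idx] += add
--             if nums[idx] % 2 == 0:
--                 s += add
--             else:
--                 s -= curr
--         else:
--             nums[idx] += add
--             if nums[idx] % 2 == 0: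
--                 s += nums[idx]
--         res.append(s)
--     return res
-- ===== SOURCE B (Python) =====
-- from typing import List
--
-- def sumEvenAfterQueries(nums: List[int], queries: List[List[int]]) -> List[int]:
--     res = []
--     for add, idx in queries:
--         nums[idx] += add
--         res.append(sum(x for x in nums if x % 2 == 0))
--     return res
-- ===== Notes on version B (the rewrite author's own statement) =====
-- stated objective: simpler
-- what changed: B drops A's incremental even-sum bookkeeping and its parity case analysis: it just applies each update and recomputes the even sum from scratch by a full rescan of nums.
import Mathlib
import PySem

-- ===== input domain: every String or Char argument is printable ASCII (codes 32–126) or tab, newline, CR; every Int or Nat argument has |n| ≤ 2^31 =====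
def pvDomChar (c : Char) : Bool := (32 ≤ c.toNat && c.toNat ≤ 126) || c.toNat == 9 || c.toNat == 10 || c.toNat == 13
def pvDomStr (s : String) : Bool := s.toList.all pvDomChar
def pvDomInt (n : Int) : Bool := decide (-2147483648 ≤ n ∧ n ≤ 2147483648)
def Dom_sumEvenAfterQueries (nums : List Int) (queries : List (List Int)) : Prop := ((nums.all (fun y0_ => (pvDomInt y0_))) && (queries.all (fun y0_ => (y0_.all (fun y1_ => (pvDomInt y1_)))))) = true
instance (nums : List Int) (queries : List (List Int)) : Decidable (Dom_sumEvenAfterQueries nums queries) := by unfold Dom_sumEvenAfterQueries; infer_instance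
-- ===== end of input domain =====

-- B replaces A's incremental even-sum bookkeeping (parity case analysis per query) by
-- recomputing the even sum from scratch after each update; A mutates its nums argument in
-- place (B performs the same mutation), the equivalence proved here is about the return value.

-- ===== PORT A =====
-- body of A's 'for add, idx in queries' loop (state: current nums, running even sum s, res)
def stepA (st : List Int × Int × List Int) (q : List Int) : List Int × Int × List Int :=
  let add := PySem.List.pyGetD q 0 0
  let idx := PySem.List.pyGetD q 1 0
  let curr := PySem.List.pyGetD st.1 idx 0
  if curr % 2 = 0 then
    let nums' := PySem.List.pySetD st.1 idx (curr + add)   -- nums[idx] += add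
    let s' := if PySem.List.pyGetD nums' idx 0 % 2 = 0 then st.2.1 + add else st.2.1 - curr
    (nums', s', st.2.2 ++ [s'])
  else
    let nums' := PySem.List.pySetD st.1 idx (curr + add)   -- nums[idx] += add
    let s' := if PySem.List.pyGetD nums' idx 0 % 2 = 0
              then st.2.1 + PySem.List.pyGetD nums' idx 0 else st.2.1
    (nums', s', st.2.2 ++ [s'])

def sumEvenAfterQueries (nums : List Int) (queries : List (List Int)) : List Int :=
  -- res = []; s = 0; for i in range(len(nums)): if nums[i] % 2 == 0: s += nums[i]
  let s0 : Int := (PySem.List.pyRange 0 nums.length 1).foldl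
    (fun s i => if PySem.List.pyGetD nums i 0 % 2 = 0 then s + PySem.List.pyGetD nums i 0 else s) 0
  (queries.foldl stepA (nums, s0, ([] : List Int))).2.2

-- ===== PORT B =====
-- body of B's loop: nums[idx] += add; res.append(sum(x for x in nums if x % 2 == 0))
def stepB (st : List Int × List Int) (q : List Int) : List Int × List Int :=
  let add := PySem.List.pyGetD q 0 0
  let idx := PySem.List.pyGetD q 1 0
  let nums' := PySem.List.pySetD st.1 idx (PySem.List.pyGetD st.1 idx 0 + add)
  (nums', st.2 ++ [(nums'.filter (fun x => x % 2 == 0)).sum])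

def sumEvenAfterQueries_alt (nums : List Int) (queries : List (List Int)) : List Int :=
  (queries.foldl stepB (nums, ([] : List Int))).2

-- ===== PRECONDITION & SPEC =====
-- Pre_ excludes exactly the inputs where the Python A raises: a query that is not a pair
-- (ValueError on unpacking) or whose index is out of Python's range for nums (IndexError).
def Pre_sumEvenAfterQueries (nums : List Int) (queries : List (List Int)) : Prop :=
  ∀ q ∈ queries, q.length = 2 ∧ PySem.Raise.InRange nums.length (PySem.List.pyGetD q 1 0)
instance (nums : List Int) (queries : List (List Int)) : Decidable (Pre_sumEvenAfterQueries nums queries) := by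
  unfold Pre_sumEvenAfterQueries PySem.Raise.InRange; infer_instance
def pvWitness_sumEvenAfterQueries : List Int × List (List Int) := ([1, 2, 3], [[2, 0], [-3, -1]])

def Spec_sumEvenAfterQueries (nums : List Int) (queries : List (List Int)) (out : List Int) : Prop := out = sumEvenAfterQueries_alt nums queries
instance (nums : List Int) (queries : List (List Int)) (out : List Int) : Decidable (Spec_sumEvenAfterQueries nums queries out) := by unfold Spec_sumEvenAfterQueries; infer_instance

-- ===== CLAIM (what is proved, stated in full; the proofs are below) =====
def Claim_equal_sumEvenAfterQueries : Prop := ∀ (nums : List Int) (queries : List (List Int)), Dom_sumEvenAfterQueries nums queries → Pre_sumEvenAfterQueries nums queries → Spec_sumEvenAfterQueries nums queries (sumEvenAfterQueries nums queries)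

-- ===== LEMMAS AND PROOFS =====
def evenSum (l : List Int) : Int := (l.filter (fun x => x % 2 == 0)).sum

lemma evenSum_cons (a : Int) (l : List Int) :
    evenSum (a :: l) = (if a % 2 = 0 then a else 0) + evenSum l := by
  rw [evenSum, List.filter_cons]
  by_cases h : a % 2 = 0
  · rw [if_pos (by simpa using h), if_pos h, List.sum_cons]; rfl
  · rw [if_neg (by simpa using h), if_neg h, zero_add]; rfl

lemma foldl_evenSum (l : List Int) (init : Int) :
    l.foldl (fun s x => if x % 2 = 0 then s + x else s) init = init + evenSum l := by
  induction l generalizing init with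
  | nil => simp [evenSum]
  | cons a l ih =>
    rw [List.foldl_cons, evenSum_cons]
    by_cases h : a % 2 = 0
    · rw [if_pos h, if_pos h, ih]; ring
    · rw [if_neg h, if_neg h, ih]; ring

lemma evenSum_set (l : List Int) (n : Nat) (v : Int) (h : n < l.length) :
    evenSum (l.set n v) =
      evenSum l - (if l[n] % 2 = 0 then l[n] else 0) + (if v % 2 = 0 then v else 0) := by
  induction l generalizing n with
  | nil => simp at h
  | cons a l ih =>
    cases n with
    | zero =>
      rw [List.set_cons_zero, evenSum_cons, evenSum_cons, List.getElem_cons_zero]; ring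
    | succ m =>
      have hm : m < l.length := by simpa using h
      rw [List.set_cons_succ, evenSum_cons, evenSum_cons, List.getElem_cons_succ, ih m hm]
      ring

lemma py_idx (len : Nat) (i : Int) (hr : PySem.Raise.InRange len i) :
    ∃ n : Nat, n < len ∧ PySem.List.pyIdx? len i = some n := by
  obtain ⟨h1, h2⟩ := hr
  by_cases hi : 0 ≤ i
  · exact ⟨i.toNat, by omega, by rw [PySem.List.pyIdx?, if_pos hi, if_pos (by omega)]⟩
  · refine ⟨len - (-i).toNat, ?_, by rw [PySem.List.pyIdx?, if_neg hi, if_pos (by omega)]⟩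
    have : 0 < (-i).toNat := by omega
    have : (-i).toNat ≤ len := by omega
    omega

lemma pyGetD_idx (xs : List Int) (i : Int) (n : Nat) (d : Int)
    (h : PySem.List.pyIdx? xs.length i = some n) : PySem.List.pyGetD xs i d = xs.getD n d := by
  rw [PySem.List.pyGetD, PySem.List.pyGet?, h, Option.bind_some, List.getD]

lemma pySetD_idx (xs : List Int) (i : Int) (n : Nat) (v : Int)
    (h : PySem.List.pyIdx? xs.length i = some n) : PySem.List.pySetD xs i v = xs.set n v := by
  rw [PySem.List.pySetD, PySem.List.pySet?, h, Option.map_some, Option.getD_some]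

lemma loop_eq (qs : List (List Int)) (cur : List Int) (s : Int) (res : List Int)
    (hq : ∀ q ∈ qs, PySem.Raise.InRange cur.length (PySem.List.pyGetD q 1 0))
    (hs : s = evenSum cur) :
    (qs.foldl stepA (cur, s, res)).2.2 = (qs.foldl stepB (cur, res)).2 := by
  induction qs generalizing cur s res with
  | nil => simp
  | cons q qs ih =>
    have hidx := hq q (List.mem_cons_self ..)
    obtain ⟨n, hn, hi⟩ := py_idx cur.length (PySem.List.pyGetD q 1 0) hidx
    have hcurr : PySem.List.pyGetD cur (PySem.List.pyGetD q 1 0) 0 = cur[n] := by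
      rw [pyGetD_idx cur _ n 0 hi, List.getD_eq_getElem _ _ hn]
    have hsetv : ∀ v : Int, PySem.List.pySetD cur (PySem.List.pyGetD q 1 0) v = cur.set n v :=
      fun v => pySetD_idx cur _ n v hi
    have hlen' : ∀ v : Int, (cur.set n v).length = cur.length := fun v => List.length_set ..
    have hget' : ∀ v : Int, PySem.List.pyGetD (cur.set n v) (PySem.List.pyGetD q 1 0) 0 = v := by
      intro v
      rw [pyGetD_idx _ _ n 0 (by rw [hlen']; exact hi),
        List.getD_eq_getElem _ _ (by rw [hlen']; exact hn), List.getElem_set_self]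
    have hq' : ∀ v : Int, ∀ q' ∈ qs,
        PySem.Raise.InRange (cur.set n v).length (PySem.List.pyGetD q' 1 0) := by
      intro v q' hmem; rw [hlen']; exact hq q' (List.mem_cons_of_mem _ hmem)
    have hES : ∀ v : Int, evenSum (cur.set n v) =
        evenSum cur - (if cur[n] % 2 = 0 then cur[n] else 0) + (if v % 2 = 0 then v else 0) :=
      fun v => evenSum_set cur n v hn
    set add := PySem.List.pyGetD q 0 0 with hadd
    have hB : stepB (cur, res) q =
        (cur.set n (cur[n] + add), res ++ [evenSum (cur.set n (cur[n] + add))]) := by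
      unfold stepB evenSum; dsimp only; rw [hcurr, hsetv]
    rw [List.foldl_cons, List.foldl_cons, hB]
    by_cases hc : cur[n] % 2 = 0
    · by_cases hc2 : (cur[n] + add) % 2 = 0
      · have hs' : s + add = evenSum (cur.set n (cur[n] + add)) := by
          rw [hES, if_pos hc, if_pos hc2]; omega
        have hA : stepA (cur, s, res) q =
            (cur.set n (cur[n] + add), s + add, res ++ [s + add]) := by
          unfold stepA; dsimp only; rw [hcurr, if_pos hc, hsetv, hget', if_pos hc2]
        rw [hA, ← hs']
        exact ih _ _ _ (hq' _) hs'
      · have hs' : s - cur[n] = evenSum (cur.set n (cur[n] + add)) := by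
          rw [hES, if_pos hc, if_neg hc2]; omega
        have hA : stepA (cur, s, res) q =
            (cur.set n (cur[n] + add), s - cur[n], res ++ [s - cur[n]]) := by
          unfold stepA; dsimp only; rw [hcurr, if_pos hc, hsetv, hget', if_neg hc2]
        rw [hA, ← hs']
        exact ih _ _ _ (hq' _) hs'
    · by_cases hc2 : (cur[n] + add) % 2 = 0
      · have hs' : s + (cur[n] + add) = evenSum (cur.set n (cur[n] + add)) := by
          rw [hES, if_neg hc, if_pos hc2]; omega
        have hA : stepA (cur, s, res) q =
            (cur.set n (cur[n] + add), s + (cur[n] + add), res ++ [s + (cur[n] + add)]) := by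
          unfold stepA; dsimp only; rw [hcurr, if_neg hc, hsetv, hget', if_pos hc2]
        rw [hA, ← hs']
        exact ih _ _ _ (hq' _) hs'
      · have hs' : s = evenSum (cur.set n (cur[n] + add)) := by
          rw [hES, if_neg hc, if_neg hc2]; omega
        have hA : stepA (cur, s, res) q =
            (cur.set n (cur[n] + add), s, res ++ [s]) := by
          unfold stepA; dsimp only; rw [hcurr, if_neg hc, hsetv, hget', if_neg hc2]
        rw [hA]
        conv_lhs => rw [hs']
        exact ih _ _ _ (hq' _) rfl

-- ===== VERDICT (by name: the statement is the Claim_ definition above) =====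
theorem sumEvenAfterQueries_spec : Claim_equal_sumEvenAfterQueries := by
  intro nums queries _ hpre
  unfold Spec_sumEvenAfterQueries sumEvenAfterQueries sumEvenAfterQueries_alt
  dsimp only
  refine loop_eq queries nums _ [] (fun q hmem => (hpre q hmem).2) ?_
  rw [PySem.List.foldl_pyRange_zero_pyGetD' nums 0
      (fun s x => if x % 2 = 0 then s + x else s) 0, foldl_evenSum, zero_add]
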